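-- pv_equiv track=rewrite | github.com/ekaterinastolbova/Quantitative-Prediction-of-HIV-Drug-Resistance | script_RFR_SVR+mutation_determination.py | find_peptides_in_text
-- ===== SOURCE A (Python) =====
-- def find_peptides_in_text(text, peptides):
--     found_peptides = []
--
--     for peptide in peptides:
--         best_match_count = 0
--         best_start_idx = 0
--
--         for i in range(len(text) - len(peptide) + 1):
--             match_count = sum(text[i+j] == peptide[j] for j in range(len(peptide)))
--             if match_count > best_match_count:
--                 best_match_count = match_count
--                 best_start_idx = i + 1
--
--         if best_match_count >= len(peptide) - 2:
--             found_peptides.append((peptide, (best_start_idx, best_start_idx+len(peptide)-1)))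
--
--     return found_peptides
-- ===== SOURCE B (Python) =====
-- def find_peptides_in_text(text, peptides):
--     # Character-position index built once; per peptide, scatter-add into a
--     # per-shift counter array instead of rescanning the text for every shift.
--     n = len(text)
--     pos = {}
--     for idx, ch in enumerate(text):
--         pos.setdefault(ch, []).append(idx)
--
--     found = []
--     for peptide in peptides:
--         m = len(peptide)
--         width = n - m + 1
--         counts = [0] * max(width, 0)
--         for j, ch in enumerate(peptide):
--             for p in pos.get(ch, ()):
--                 i = p - j
--                 if 0 <= i < width:
--                     counts[i] += 1
--         best_count = 0
--         best_start = 0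
--         for i, c in enumerate(counts):
--             if c > best_count:
--                 best_count = c
--                 best_start = i + 1
--         if best_count >= m - 2:
--             found.append((peptide, (best_start, best_start + m - 1)))
--     return found
-- ===== Notes on version B (the rewrite author's own statement) =====
-- stated objective: faster
-- what changed: Instead of rescanning the text at every shift for every peptide (triple loop), B builds a character->positions index of the text once and, per peptide, scatter-adds each occurrence of each peptide character into a per-shift counter array, then takes the first strict argmax.
import Mathlib
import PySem

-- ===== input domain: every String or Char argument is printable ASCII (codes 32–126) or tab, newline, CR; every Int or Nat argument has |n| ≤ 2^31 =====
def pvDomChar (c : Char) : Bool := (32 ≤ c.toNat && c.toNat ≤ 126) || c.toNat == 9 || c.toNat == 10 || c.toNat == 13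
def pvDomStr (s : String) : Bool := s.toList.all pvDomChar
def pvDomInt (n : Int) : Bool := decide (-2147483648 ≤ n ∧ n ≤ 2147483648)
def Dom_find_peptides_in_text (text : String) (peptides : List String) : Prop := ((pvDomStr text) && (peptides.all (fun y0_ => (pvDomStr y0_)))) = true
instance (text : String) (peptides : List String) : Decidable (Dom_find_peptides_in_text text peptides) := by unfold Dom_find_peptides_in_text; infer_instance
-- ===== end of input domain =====

-- B replaces A's per-shift rescan of the text by a character-position index built once
-- plus a scatter-add counter array per peptide (objective: faster; equal return values).

-- ===== PORT A =====
-- match_count = sum(text[i+j] == peptide[j] for j in range(len(peptide)))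
def pvMatchCount (t p : List Char) (i : Int) : Int :=
  (PySem.List.pyRange 0 (p.length : Int) 1).foldl
    (fun s j => s + (if PySem.List.pyGet? t (i + j) = PySem.List.pyGet? p j then 1 else 0)) 0

-- the inner 'for i in range(len(text) - len(peptide) + 1)' loop of A
def pvBestA (t p : List Char) : Int × Int :=
  (PySem.List.pyRange 0 ((t.length : Int) - (p.length : Int) + 1) 1).foldl
    (fun b i =>
      let mc := pvMatchCount t p i
      if mc > b.1 then (mc, i + 1) else b) (0, 0)

def find_peptides_in_text (text : String) (peptides : List String) : List (String × (Int × Int)) :=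
  peptides.foldl (fun acc peptide =>
    let p := peptide.toList
    let b := pvBestA text.toList p
    if b.1 ≥ (p.length : Int) - 2 then
      acc ++ [(peptide, (b.2, b.2 + (p.length : Int) - 1))]
    else acc) []

-- ===== PORT B =====
-- pos.setdefault(ch, []).append(idx) for idx, ch in enumerate(text)
def pvPosIndex (t : List Char) : PySem.Dict Char (List Int) :=
  (PySem.List.enumerate t 0).foldl (fun d iv => d.modify iv.2 [] (· ++ [iv.1])) PySem.Dict.empty

-- counts = [0]*max(width,0); for j, ch in enumerate(peptide): for pp in pos.get(ch, ()): …
def pvScatter (pos : PySem.Dict Char (List Int)) (w : Int) (p : List Char) : List Int :=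
  (PySem.List.enumerate p 0).foldl
    (fun cs jch =>
      (pos.getD jch.2 []).foldl
        (fun cs2 pp =>
          if 0 ≤ pp - jch.1 ∧ pp - jch.1 < w then
            cs2.set (pp - jch.1).toNat (cs2.getD (pp - jch.1).toNat 0 + 1)
          else cs2) cs)
    (List.replicate w.toNat 0)

-- for i, c in enumerate(counts): if c > best_count: …
def pvBestB (counts : List Int) : Int × Int :=
  (PySem.List.enumerate counts 0).foldl
    (fun b ic => if ic.2 > b.1 then (ic.2, ic.1 + 1) else b) (0, 0)

def find_peptides_in_text_alt (text : String) (peptides : List String) : List (String × (Int × Int)) :=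
  let t := text.toList
  let pos := pvPosIndex t
  peptides.foldl (fun acc peptide =>
    let p := peptide.toList
    let w : Int := (t.length : Int) - (p.length : Int) + 1
    let b := pvBestB (pvScatter pos w p)
    if b.1 ≥ (p.length : Int) - 2 then
      acc ++ [(peptide, (b.2, b.2 + (p.length : Int) - 1))]
    else acc) []

-- ===== PRECONDITION & SPEC =====
def Spec_find_peptides_in_text (text : String) (peptides : List String) (out : List (String × (Int × Int))) : Prop := out = find_peptides_in_text_alt text peptides
instance (text : String) (peptides : List String) (out : List (String × (Int × Int))) : Decidable (Spec_find_peptides_in_text text peptides out) := by unfold Spec_find_peptides_in_text; infer_instance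

-- ===== CLAIM (what is proved, stated in full; the proofs are below) =====
def Claim_equal_find_peptides_in_text : Prop := ∀ (text : String) (peptides : List String), Dom_find_peptides_in_text text peptides → Spec_find_peptides_in_text text peptides (find_peptides_in_text text peptides)

-- ===== LEMMAS AND PROOFS =====

-- the positions list pvPosIndex associates with a character, as a direct expression
def pvPosSpec (t : List Char) (ch : Char) : List Int :=
  (((PySem.List.enumerate t 0).map Prod.swap).filter (fun q => q.1 == ch)).map (·.2)

theorem pvPosIndex_getD (t : List Char) (ch : Char) :
    (pvPosIndex t).getD ch [] = pvPosSpec t ch := by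
  unfold pvPosIndex pvPosSpec
  have h := List.foldl_map (f := Prod.swap)
    (g := fun (d : PySem.Dict Char (List Int)) (q : Char × Int) => d.modify q.1 [] (· ++ [q.2]))
    (l := PySem.List.enumerate t 0) (init := PySem.Dict.empty)
  simp only [Prod.fst_swap, Prod.snd_swap] at h
  rw [← h, PySem.Dict.getD_foldl_modify_append]
  simp [PySem.Dict.getD_empty]

theorem mem_pvPosSpec (t : List Char) (ch : Char) (pp : Int) :
    pp ∈ pvPosSpec t ch ↔ ∃ k : Nat, ∃ h : k < t.length, pp = (k : Int) ∧ t[k] = ch := by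
  unfold pvPosSpec
  simp only [List.mem_map, List.mem_filter, PySem.List.mem_enumerate_iff]
  constructor
  · rintro ⟨a, ⟨⟨a1, ⟨k, hk, rfl⟩, rfl⟩, h2⟩, rfl⟩
    exact ⟨k, hk, by simp, by simpa using h2⟩
  · rintro ⟨k, hk, rfl, rfl⟩
    exact ⟨((0:Int) + k, t[k]).swap, ⟨⟨((0:Int) + k, t[k]), ⟨k, hk, rfl⟩, rfl⟩, by simp⟩, by simp⟩

theorem nodup_pvPosSpec (t : List Char) (ch : Char) : (pvPosSpec t ch).Nodup := by
  unfold pvPosSpec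
  have h1 : (((PySem.List.enumerate t 0).map Prod.swap).filter (fun q => q.1 == ch)).Pairwise (fun p q => p.2 < q.2) := by
    apply List.Pairwise.filter
    rw [List.pairwise_map]
    exact PySem.List.pairwise_lt_enumerate t 0
  have h2 : ((((PySem.List.enumerate t 0).map Prod.swap).filter (fun q => q.1 == ch)).map (·.2)).Pairwise (· < ·) :=
    (List.pairwise_map).2 h1
  exact h2.imp (fun h => ne_of_lt h)

-- one inner scatter loop leaves the counter array's length unchanged
theorem scatter_inner_length (w j : Int) (L : List Int) :
    ∀ cs : List Int,
    (L.foldl (fun cs2 pp =>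
        if 0 ≤ pp - j ∧ pp - j < w then
          cs2.set (pp - j).toNat (cs2.getD (pp - j).toNat 0 + 1)
        else cs2) cs).length = cs.length := by
  induction L with
  | nil => intro cs; rfl
  | cons pp L ih =>
    intro cs
    rw [List.foldl_cons, ih]
    split_ifs <;> simp

-- one inner scatter loop: pointwise effect on the counter array
theorem scatter_inner (w j : Int) (L : List Int) (hnd : L.Nodup) :
    ∀ (cs : List Int) (k : Nat), (k : Int) < w → k < cs.length →
    (L.foldl (fun cs2 pp =>
        if 0 ≤ pp - j ∧ pp - j < w then
          cs2.set (pp - j).toNat (cs2.getD (pp - j).toNat 0 + 1)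
        else cs2) cs).getD k 0
      = cs.getD k 0 + (if ((k : Int) + j) ∈ L then 1 else 0) := by
  induction L with
  | nil => intro cs k _ _; simp
  | cons pp L ih =>
    intro cs k hkw hkcs
    obtain ⟨hpp, hnd'⟩ := List.nodup_cons.1 hnd
    rw [List.foldl_cons]
    by_cases hval : pp = (k : Int) + j
    · subst hval
      have hcond : 0 ≤ (k:Int) + j - j ∧ (k:Int) + j - j < w := by constructor <;> omega
      have htn : ((k:Int) + j - j).toNat = k := by omega
      rw [if_pos hcond, htn,
        ih hnd' _ k hkw (by simpa using hkcs)]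
      have hset : (cs.set k (cs.getD k 0 + 1)).getD k 0 = cs.getD k 0 + 1 := by
        simp [List.getD_eq_getElem?_getD, hkcs]
      rw [hset]
      rw [if_pos (List.mem_cons_self (a := (k:Int) + j) (l := L)), if_neg hpp]
      ring
    · have hne : ((k:Int) + j ∈ pp :: L) ↔ ((k:Int) + j ∈ L) := by
        simp only [List.mem_cons, or_iff_right (fun h : (k:Int) + j = pp => hval h.symm)]
      by_cases hcond : 0 ≤ pp - j ∧ pp - j < w
      · have htn : (pp - j).toNat ≠ k := by omega
        rw [if_pos hcond, ih hnd' _ k hkw (by simpa using hkcs)]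
        have hset : (cs.set (pp - j).toNat (cs.getD (pp - j).toNat 0 + 1)).getD k 0 = cs.getD k 0 := by
          simp [List.getD_eq_getElem?_getD, htn]
        rw [hset]
        by_cases hm : ((k:Int) + j ∈ L) <;> simp [hne, hm]
      · rw [if_neg hcond, ih hnd' _ k hkw hkcs]
        by_cases hm : ((k:Int) + j ∈ L) <;> simp [hne, hm]

-- the whole scatter loop, pointwise
theorem scatter_outer (t : List Char) (w : Int) (p : List Char) :
    ∀ (s : Int) (cs : List Int) (k : Nat), (k : Int) < w → k < cs.length →
    ((PySem.List.enumerate p s).foldl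
      (fun cs' jch =>
        ((pvPosIndex t).getD jch.2 []).foldl
          (fun cs2 pp =>
            if 0 ≤ pp - jch.1 ∧ pp - jch.1 < w then
              cs2.set (pp - jch.1).toNat (cs2.getD (pp - jch.1).toNat 0 + 1)
            else cs2) cs') cs).getD k 0
      = cs.getD k 0 + ((PySem.List.enumerate p s).countP
          (fun jc => decide (((k : Int) + jc.1) ∈ pvPosSpec t jc.2)) : Int) := by
  induction p with
  | nil => intro s cs k _ _; simp [PySem.List.enumerate_nil]
  | cons c p ih =>
    intro s cs k hkw hkcs
    rw [PySem.List.enumerate_cons, List.foldl_cons, List.countP_cons]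
    rw [ih (s+1) _ k hkw (by rw [scatter_inner_length]; exact hkcs)]
    rw [pvPosIndex_getD,
      scatter_inner w s (pvPosSpec t c) (nodup_pvPosSpec t c) cs k hkw hkcs]
    push_cast
    by_cases hm : ((k:Int) + s) ∈ pvPosSpec t c <;> simp [hm] <;> try ring

-- the scatter loop leaves the counter array's length unchanged
theorem scatter_fold_length (pos : PySem.Dict Char (List Int)) (w : Int) (p : List Char) :
    ∀ (s : Int) (cs : List Int),
    ((PySem.List.enumerate p s).foldl
      (fun cs' jch =>
        (pos.getD jch.2 []).foldl
          (fun cs2 pp =>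
            if 0 ≤ pp - jch.1 ∧ pp - jch.1 < w then
              cs2.set (pp - jch.1).toNat (cs2.getD (pp - jch.1).toNat 0 + 1)
            else cs2) cs') cs).length = cs.length := by
  induction p with
  | nil => intro s cs; simp [PySem.List.enumerate_nil]
  | cons c p ih =>
    intro s cs
    rw [PySem.List.enumerate_cons, List.foldl_cons, ih, scatter_inner_length]

theorem pvScatter_length (pos : PySem.Dict Char (List Int)) (w : Int) (p : List Char) :
    (pvScatter pos w p).length = w.toNat := by
  unfold pvScatter
  rw [scatter_fold_length]
  simp

-- A's inner match-count loop counts exactly the agreeing offsets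
theorem pvMatchCount_countP (t p : List Char) (k : Nat) :
    pvMatchCount t p (k : Int) =
      ((List.range p.length).countP (fun j => decide (t[k + j]? = p[j]?)) : Int) := by
  unfold pvMatchCount
  rw [PySem.List.pyRange_zero_natCast, List.foldl_map]
  rw [PySem.List.foldl_congr_mem _ _
    (fun (s : Int) (jj : Nat) => if (fun j => decide (t[k + j]? = p[j]?)) jj then s + 1 else s) 0 ?_]
  · rw [PySem.List.foldl_count_if]; simp
  · intro acc jj _
    simp only [PySem.List.pyGet?_natCast, decide_eq_true_eq]
    have h1 : (k : Int) + (jj : Int) = ((k + jj : Nat) : Int) := by push_cast; ring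
    rw [h1, PySem.List.pyGet?_natCast]
    by_cases h : t[k + jj]? = p[jj]? <;> simp [h]

-- B's scattered hit counts coincide with A's count of agreeing offsets
theorem countP_bridge (t p : List Char) (k : Nat) :
    ((PySem.List.enumerate p 0).countP
      (fun jc => decide (((k : Int) + jc.1) ∈ pvPosSpec t jc.2)))
      = (List.range p.length).countP (fun j => decide (t[k + j]? = p[j]?)) := by
  rw [PySem.List.enumerate_eq_map_pyRange p 'A', List.countP_map]
  have hl : PySem.List.len p = (p.length : Int) := by simp [PySem.List.len]
  rw [hl, PySem.List.pyRange_zero_natCast, List.countP_map]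
  apply List.countP_congr
  intro jj hjj
  have hjj' : jj < p.length := List.mem_range.1 hjj
  simp only [Function.comp_apply, PySem.List.pyGetD_natCast, decide_eq_true_eq]
  rw [List.getD_eq_getElem p 'A' hjj', mem_pvPosSpec]
  constructor
  · rintro ⟨k', hk', heq, hch⟩
    have : k + jj = k' := by omega
    subst this
    rw [List.getElem?_eq_getElem hjj', List.getElem?_eq_getElem hk']
    simp [hch]
  · intro h
    have hp : p[jj]? = some p[jj] := List.getElem?_eq_getElem hjj'
    rw [hp] at h
    obtain ⟨hlt, hval⟩ := List.getElem?_eq_some_iff.1 h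
    exact ⟨k + jj, hlt, by push_cast; ring, hval⟩

theorem pvScatter_getD (t : List Char) (p : List Char) (k : Nat)
    (hk : (k : Int) < (t.length : Int) - (p.length : Int) + 1) :
    (pvScatter (pvPosIndex t) ((t.length : Int) - (p.length : Int) + 1) p).getD k 0
      = pvMatchCount t p (k : Int) := by
  have hlen : k < (List.replicate ((t.length : Int) - (p.length : Int) + 1).toNat (0:Int)).length := by
    simp; omega
  unfold pvScatter
  rw [scatter_outer t _ p 0 _ k hk hlen, countP_bridge t p k,
    List.getD_replicate 0 (by omega), pvMatchCount_countP]
  ring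

theorem pvBestB_eq_pvBestA (t p : List Char) :
    pvBestB (pvScatter (pvPosIndex t) ((t.length : Int) - (p.length : Int) + 1) p) = pvBestA t p := by
  unfold pvBestB pvBestA
  set w : Int := (t.length : Int) - (p.length : Int) + 1 with hw
  set counts := pvScatter (pvPosIndex t) w p with hcounts
  have hlen : counts.length = w.toNat := pvScatter_length _ _ _
  rcases le_or_gt w 0 with hle | hpos
  · have h1 : counts = [] := by
      rw [List.eq_nil_iff_length_eq_zero, hlen]; omega
    rw [h1, PySem.List.pyRange_one_eq_nil (by omega)]
    simp [PySem.List.enumerate_nil]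
  · have hc : PySem.List.enumerate counts 0 =
        (PySem.List.pyRange 0 w 1).map (fun j => (j, PySem.List.pyGetD counts j 0)) := by
      rw [PySem.List.enumerate_eq_map_pyRange counts 0]
      have : PySem.List.len counts = w := by simp [PySem.List.len, hlen]; omega
      rw [this]
    rw [hc, List.foldl_map]
    apply PySem.List.foldl_congr_mem
    intro b i hi
    have hi' := (PySem.List.mem_pyRange_one).1 hi
    have hgd : PySem.List.pyGetD counts i 0 = pvMatchCount t p i := by
      have hkc : i.toNat < counts.length := by rw [hlen]; omega
      rw [PySem.List.pyGetD_eq_getElem _ _ hi'.1 (by simp [hlen]; omega)]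
      have := pvScatter_getD t p i.toNat (by rw [← hw]; omega)
      rw [← hw, ← hcounts, List.getD_eq_getElem?_getD, List.getElem?_eq_getElem hkc] at this
      simp at this
      rw [this]; congr 1; omega
    rw [hgd]

-- ===== VERDICT (by name: the statement is the Claim_ definition above) =====
theorem find_peptides_in_text_spec : Claim_equal_find_peptides_in_text := by
  intro text peptides _
  unfold Spec_find_peptides_in_text find_peptides_in_text find_peptides_in_text_alt
  apply PySem.List.foldl_congr_mem
  intro acc peptide _
  simp only [pvBestB_eq_pvBestA]
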